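-- pv_equiv track=rewrite | github.com/qqqcat/vibe-coding-cn | scripts/sync-doc-toc.py | title_from_anchor
-- ===== SOURCE A (Python) =====
-- def title_from_anchor(anchor: str, main_anchors: list[str]) -> str:
--     for main_anchor in sorted(main_anchors, key=len, reverse=True):
--         if anchor == main_anchor:
--             return main_anchor
--         prefix = f"{main_anchor}-"
--         if anchor.startswith(prefix):
--             return anchor.removeprefix(prefix).replace("-", " ")
--     return anchor.replace("-", " ")
-- ===== SOURCE B (Python) =====
-- def title_from_anchor(anchor: str, main_anchors: list[str]) -> str:
--     best = None
--     for ma in main_anchors: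
--         if ma == anchor:
--             return anchor
--         if anchor.startswith(ma + "-") and (best is None or len(best) < len(ma)):
--             best = ma
--     if best is not None:
--         return anchor[len(best) + 1:].replace("-", " ")
--     return anchor.replace("-", " ")
-- ===== Notes on version B (the rewrite author's own statement) =====
-- stated objective: faster
-- what changed: Replaced sort-by-length-then-first-match with a single pass that returns immediately on an exact match and otherwise tracks the longest prefix-matching anchor (running max), eliminating the sort.
import Mathlib
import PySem

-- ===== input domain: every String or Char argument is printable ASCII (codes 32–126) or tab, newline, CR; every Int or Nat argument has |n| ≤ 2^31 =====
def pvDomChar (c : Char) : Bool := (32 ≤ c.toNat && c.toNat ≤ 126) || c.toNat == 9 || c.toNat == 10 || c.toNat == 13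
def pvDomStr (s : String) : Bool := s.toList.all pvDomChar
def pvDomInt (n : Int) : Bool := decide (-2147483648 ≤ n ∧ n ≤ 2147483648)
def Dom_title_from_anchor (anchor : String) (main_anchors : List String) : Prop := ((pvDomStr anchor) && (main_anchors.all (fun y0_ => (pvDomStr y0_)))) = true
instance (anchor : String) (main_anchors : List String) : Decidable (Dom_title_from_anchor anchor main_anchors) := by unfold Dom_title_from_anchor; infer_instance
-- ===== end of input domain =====

-- B replaces A's sort-by-length-descending + first-match scan by a single pass with an
-- early return on exact match and a running longest-prefix-match accumulator (objective: faster, no sort).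

-- ===== PORT A =====
-- Python's s.removeprefix(p), ported by hand (exact): drop len(p) chars when p is a prefix, else unchanged.
def pyRemoveprefix (s p : String) : String :=
  if PySem.Str.startswith s p then String.ofList (s.toList.drop p.toList.length) else s

def titleLoopA (anchor : String) : List String → String
  | [] => PySem.Str.replace anchor "-" " "
  | ma :: rest =>
    if anchor == ma then ma
    else if PySem.Str.startswith anchor (ma ++ "-") then
      PySem.Str.replace (pyRemoveprefix anchor (ma ++ "-")) "-" " "
    else titleLoopA anchor rest

def title_from_anchor (anchor : String) (main_anchors : List String) : String :=
  titleLoopA anchor (PySem.List.sorted main_anchors (fun s => PySem.Str.len s) true)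

-- ===== PORT B =====
def titleLoopB (anchor : String) : List String → Option String → String
  | [], best =>
    match best with
    | none => PySem.Str.replace anchor "-" " "
    | some b => PySem.Str.replace (PySem.Str.slice anchor (some ((PySem.Str.len b : Int) + 1)) none) "-" " "
  | ma :: rest, best =>
    if ma == anchor then anchor
    else if PySem.Str.startswith anchor (ma ++ "-") &&
            (match best with
             | none => true
             | some b => decide (PySem.Str.len b < PySem.Str.len ma)) then
      titleLoopB anchor rest (some ma)
    else titleLoopB anchor rest best

def title_from_anchor_alt (anchor : String) (main_anchors : List String) : String :=
  titleLoopB anchor main_anchors none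

-- ===== PRECONDITION & SPEC =====
def Spec_title_from_anchor (anchor : String) (main_anchors : List String) (out : String) : Prop := out = title_from_anchor_alt anchor main_anchors
instance (anchor : String) (main_anchors : List String) (out : String) : Decidable (Spec_title_from_anchor anchor main_anchors out) := by unfold Spec_title_from_anchor; infer_instance

-- ===== CLAIM (what is proved, stated in full; the proofs are below) =====
def Claim_equal_title_from_anchor : Prop := ∀ (anchor : String) (main_anchors : List String), Dom_title_from_anchor anchor main_anchors → Spec_title_from_anchor anchor main_anchors (title_from_anchor anchor main_anchors)

-- ===== LEMMAS AND PROOFS =====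

-- canonical spec: exact match wins; otherwise the maximal length of a prefix-matching anchor decides
def gN (anchor : String) (acc : Option Nat) (ma : String) : Option Nat :=
  if PySem.Str.startswith anchor (ma ++ "-") then
    some (acc.elim ma.length (fun k => max k ma.length))
  else acc

def specTitle (anchor : String) (L : List String) : String :=
  if anchor ∈ L then anchor
  else
    match L.foldl (gN anchor) none with
    | none => PySem.Str.replace anchor "-" " "
    | some k => PySem.Str.replace (String.ofList (anchor.toList.drop (k + 1))) "-" " "

lemma append_dash_toList (ma : String) : (ma ++ "-").toList = ma.toList ++ ['-'] := by
  simp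

lemma startswith_len_lt (anchor ma : String)
    (h : PySem.Str.startswith anchor (ma ++ "-") = true) :
    ma.length < anchor.length := by
  rw [PySem.Str.startswith_eq, PySem.Chars.startswith_iff] at h
  have := h.length_le
  rw [append_dash_toList] at this
  simp at this
  omega

lemma gN_comm (anchor : String) : ∀ (acc : Option Nat) (a b : String),
    gN anchor (gN anchor acc a) b = gN anchor (gN anchor acc b) a := by
  intro acc a b
  cases acc <;> unfold gN <;> split_ifs <;> simp [Option.elim] <;> omega

lemma foldl_gN_const (anchor : String) :
    ∀ (rest : List String) (k : Nat), (∀ y ∈ rest, y.length ≤ k) →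
      rest.foldl (gN anchor) (some k) = some k := by
  intro rest
  induction rest with
  | nil => intro k _; rfl
  | cons y ys ih =>
    intro k h
    have hy : y.length ≤ k := h y (by simp)
    have hstep : gN anchor (some k) y = some k := by
      unfold gN; split_ifs <;> simp [Option.elim, Nat.max_eq_left hy]
    rw [List.foldl_cons, hstep]
    exact ih k (fun z hz => h z (by simp [hz]))

lemma loopA_spec (anchor : String) :
    ∀ L : List String, L.Pairwise (fun a b => PySem.Str.len b ≤ PySem.Str.len a) →
      titleLoopA anchor L = specTitle anchor L := by
  intro L
  induction L with
  | nil => intro _; simp [titleLoopA, specTitle]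
  | cons ma rest ih =>
    intro hpw
    rw [List.pairwise_cons] at hpw
    obtain ⟨h1, h2⟩ := hpw
    by_cases he : anchor = ma
    · subst he
      simp [titleLoopA, specTitle]
    · by_cases hp : PySem.Str.startswith anchor (ma ++ "-") = true
      · -- prefix match on ma: ma has maximal length; anchor is not in the list
        have hlt := startswith_len_lt anchor ma hp
        have hnm : anchor ∉ rest := by
          intro hmem
          have := h1 anchor hmem
          simp [PySem.Str.len_eq] at this
          omega
        have hfold : rest.foldl (gN anchor) (some ma.length) = some ma.length := by
          apply foldl_gN_const
          intro y hy
          have := h1 y hy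
          simp [PySem.Str.len_eq] at this
          exact_mod_cast this
        have hrp : pyRemoveprefix anchor (ma ++ "-") = String.ofList (anchor.toList.drop (ma.length + 1)) := by
          unfold pyRemoveprefix
          rw [if_pos hp, append_dash_toList]
          simp
        simp only [titleLoopA, specTitle, beq_iff_eq, if_neg he, if_pos hp, hrp]
        have hgN : gN anchor none ma = some ma.length := by
          unfold gN; rw [if_pos hp]; rfl
        rw [if_neg (by simp [he, hnm]), List.foldl_cons, hgN, hfold]
      · -- no match on ma: skip it
        simp only [titleLoopA, specTitle, beq_iff_eq, if_neg he, if_neg hp]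
        rw [ih h2]
        have hgN : gN anchor none ma = none := by unfold gN; rw [if_neg hp]
        simp [specTitle, hgN, he]

lemma loopB_spec (anchor : String) :
    ∀ (L : List String) (best : Option String),
      titleLoopB anchor L best =
        (if anchor ∈ L then anchor
         else
           match L.foldl (gN anchor) (best.map (fun b => b.length)) with
           | none => PySem.Str.replace anchor "-" " "
           | some k => PySem.Str.replace (String.ofList (anchor.toList.drop (k + 1))) "-" " ") := by
  intro L
  induction L with
  | nil =>
    intro best
    cases best with
    | none => simp [titleLoopB]
    | some b =>
      simp only [titleLoopB, List.foldl_nil, Option.map_some, List.not_mem_nil, if_false]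
      congr 1
      apply String.toList_inj.mp
      rw [PySem.Str.toList_slice]
      simp only [PySem.Chars.slice_eq_listSlice]
      have h0 : (0:Int) ≤ PySem.Str.len b + 1 := by
        rw [PySem.Str.len_eq]; positivity
      rw [PySem.List.slice_from _ h0]
      have ht : (PySem.Str.len b + 1).toNat = b.length + 1 := by
        rw [PySem.Str.len_eq]; simp
      rw [ht]
      simp
  | cons ma rest ih =>
    intro best
    by_cases he : ma = anchor
    · subst he
      simp [titleLoopB]
    · have hne : anchor ≠ ma := fun h => he h.symm
      by_cases hp : PySem.Str.startswith anchor (ma ++ "-") = true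
      · cases best with
        | none =>
          simp only [titleLoopB, beq_iff_eq, if_neg he, hp, Bool.true_and]
          rw [ih (some ma)]
          have hgN : gN anchor none ma = some ma.length := by
            unfold gN; rw [if_pos hp]; rfl
          simp [hne, hgN]
        | some b =>
          by_cases hlt : PySem.Str.len b < PySem.Str.len ma
          · simp only [titleLoopB, beq_iff_eq, if_neg he, hp, Bool.true_and, decide_eq_true_eq,
              if_pos hlt]
            rw [ih (some ma)]
            have hgN : gN anchor (some b.length) ma = some ma.length := by
              unfold gN
              rw [if_pos hp]
              simp only [Option.elim, Option.some.injEq]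
              rw [PySem.Str.len_eq, PySem.Str.len_eq] at hlt
              simp at hlt
              omega
            simp [hne, hgN]
          · simp only [titleLoopB, beq_iff_eq, if_neg he, hp, Bool.true_and, decide_eq_true_eq,
              if_neg hlt]
            rw [ih (some b)]
            have hgN : gN anchor (some b.length) ma = some b.length := by
              unfold gN
              rw [if_pos hp]
              simp only [Option.elim, Option.some.injEq]
              rw [PySem.Str.len_eq, PySem.Str.len_eq] at hlt
              simp at hlt
              omega
            simp [hne, hgN]
      · have hp' : PySem.Str.startswith anchor (ma ++ "-") = false := by
          simpa using hp
        simp only [titleLoopB, beq_iff_eq, if_neg he, hp', Bool.false_and, Bool.false_eq_true,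
          if_false]
        rw [ih best]
        have hgN : gN anchor (best.map (fun b => b.length)) ma = best.map (fun b => b.length) := by
          unfold gN; rw [if_neg hp]
        simp [hne, hgN]

lemma specTitle_perm (anchor : String) {L₁ L₂ : List String} (p : L₁.Perm L₂) :
    specTitle anchor L₁ = specTitle anchor L₂ := by
  unfold specTitle
  rw [p.foldl_eq' (fun x _ y _ z => gN_comm anchor z x y) none]
  congr 1
  simp [p.mem_iff]

-- ===== VERDICT (by name: the statement is the Claim_ definition above) =====
theorem title_from_anchor_spec : Claim_equal_title_from_anchor := by
  intro anchor mas _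
  unfold Spec_title_from_anchor title_from_anchor title_from_anchor_alt
  rw [loopA_spec anchor _ (PySem.List.sorted_pairwise_rev mas (fun s => PySem.Str.len s)),
      specTitle_perm anchor (PySem.List.sorted_perm mas (fun s => PySem.Str.len s) true),
      loopB_spec anchor mas none]
  rfl
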